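-- pv_equiv track=rewrite | github.com/theoneandonlysolo/workspace | homework/module02/ex5/ft_data_stream.py | event_stream
-- ===== SOURCE A (Python) =====
-- from typing import Generator
--
-- def event_stream(n: int) -> Generator[str, None, None]:
--     players = ["alice", "bob", "charlie"]
--     actions = ["killed monster", "found treasure", "leveled up"]
--
--     i = 0
--     while i < n:
--         player = players[i % 3]
--         level = (i % 15) + 1
--         action = actions[i % 3]
--
--         yield f"Player {player} (level {level}) {action}"
--         i += 1
-- ===== SOURCE B (Python) =====
-- def event_stream(n: int):
--     players = ["alice", "bob", "charlie"]
--     actions = ["killed monster", "found treasure", "leveled up"]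
--     # i % 3 == (i % 15) % 3, so every yielded line is a function of i % 15 alone:
--     # precompute the 15 distinct lines once, then just index by i % 15.
--     table = [
--         f"Player {players[j % 3]} (level {j + 1}) {actions[j % 3]}"
--         for j in range(15)
--     ]
--     for i in range(n):
--         yield table[i % 15]
-- ===== Notes on version B (the rewrite author's own statement) =====
-- stated objective: faster
-- what changed: B precomputes the possible output lines once (the output is periodic with period 15 since 3 divides 15) and the loop becomes a single table lookup by the period index, instead of re-indexing and re-formatting player, level and action on every iteration.
import Mathlib
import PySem

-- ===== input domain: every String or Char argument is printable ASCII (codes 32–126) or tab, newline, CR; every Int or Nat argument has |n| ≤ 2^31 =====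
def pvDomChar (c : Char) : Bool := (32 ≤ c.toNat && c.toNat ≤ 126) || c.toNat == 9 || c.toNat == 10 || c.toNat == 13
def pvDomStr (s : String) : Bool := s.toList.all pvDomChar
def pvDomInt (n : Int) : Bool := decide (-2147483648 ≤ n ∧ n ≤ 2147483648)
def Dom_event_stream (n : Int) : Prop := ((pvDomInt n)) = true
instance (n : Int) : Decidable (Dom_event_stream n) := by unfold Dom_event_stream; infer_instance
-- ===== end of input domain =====

-- B precomputes the 15 possible output lines once (period 15, since 3 ∣ 15) and yields table[i % 15];
-- A recomputes player, level and action each iteration. Return-value equivalence (A is a generator; we model its yielded sequence as a list).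

-- ===== PORT A =====
-- the body of A's while loop, yielded then i += 1; recursion on the remaining count n - i
def eventStreamGo (n i : Int) : List String :=
  if _h : i < n then
    ("Player " ++ PySem.List.pyGetD ["alice", "bob", "charlie"] (PySem.Int.mod i 3) ""
      ++ " (level " ++ PySem.Int.toStr (PySem.Int.mod i 15 + 1) ++ ") "
      ++ PySem.List.pyGetD ["killed monster", "found treasure", "leveled up"] (PySem.Int.mod i 3) "")
    :: eventStreamGo n (i + 1)
  else []
termination_by (n - i).toNat
decreasing_by omega

def event_stream (n : Int) : List String := eventStreamGo n 0

-- ===== PORT B =====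
-- the precomputed 15-line table of Source B
def eventTable : List String :=
  (PySem.List.pyRange 0 15 1).map (fun j =>
    "Player " ++ PySem.List.pyGetD ["alice", "bob", "charlie"] (PySem.Int.mod j 3) ""
      ++ " (level " ++ PySem.Int.toStr (j + 1) ++ ") "
      ++ PySem.List.pyGetD ["killed monster", "found treasure", "leveled up"] (PySem.Int.mod j 3) "")

def event_stream_alt (n : Int) : List String :=
  (PySem.List.pyRange 0 n 1).map (fun i => PySem.List.pyGetD eventTable (PySem.Int.mod i 15) "")

-- ===== PRECONDITION & SPEC =====
def Spec_event_stream (n : Int) (out : List String) : Prop := out = event_stream_alt n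
instance (n : Int) (out : List String) : Decidable (Spec_event_stream n out) := by unfold Spec_event_stream; infer_instance

-- ===== CLAIM (what is proved, stated in full; the proofs are below) =====
def Claim_equal_event_stream : Prop := ∀ (n : Int), Dom_event_stream n → Spec_event_stream n (event_stream n)

-- ===== LEMMAS AND PROOFS =====

-- A's loop, unrolled into a map over the same range B iterates
theorem eventStreamGo_eq_map (n i : Int) :
    eventStreamGo n i = (PySem.List.pyRange i n 1).map (fun j =>
      "Player " ++ PySem.List.pyGetD ["alice", "bob", "charlie"] (PySem.Int.mod j 3) ""
        ++ " (level " ++ PySem.Int.toStr (PySem.Int.mod j 15 + 1) ++ ") "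
        ++ PySem.List.pyGetD ["killed monster", "found treasure", "leveled up"] (PySem.Int.mod j 3) "") := by
  by_cases h : i < n
  · rw [eventStreamGo, PySem.List.pyRange_one_cons h]
    simp only [h, dif_pos, List.map_cons]
    exact congrArg _ (eventStreamGo_eq_map n (i + 1))
  · rw [eventStreamGo, PySem.List.pyRange_one_eq_nil (by omega)]
    simp [h]
termination_by (n - i).toNat
decreasing_by omega

-- pointwise: A's formatted line at i is B's table entry at i % 15 (3 ∣ 15, so i % 3 = (i % 15) % 3)
theorem line_eq_table (i : Int) :
    "Player " ++ PySem.List.pyGetD ["alice", "bob", "charlie"] (PySem.Int.mod i 3) ""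
      ++ " (level " ++ PySem.Int.toStr (PySem.Int.mod i 15 + 1) ++ ") "
      ++ PySem.List.pyGetD ["killed monster", "found treasure", "leveled up"] (PySem.Int.mod i 3) ""
    = PySem.List.pyGetD eventTable (PySem.Int.mod i 15) "" := by
  have h15 : PySem.Int.mod i 15 = i % 15 := PySem.Int.mod_eq_emod_of_pos (by omega)
  have h3 : PySem.Int.mod i 3 = i % 3 := PySem.Int.mod_eq_emod_of_pos (by omega)
  rw [eventTable, h15, h3,
    PySem.List.pyGetD_map_pyRange_of_nonneg _ 15 (i % 15) ""
      (Int.emod_nonneg i (by norm_num)) (Int.emod_lt_of_pos i (by norm_num))]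
  have hmod3 : PySem.Int.mod (i % 15) 3 = i % 3 := by
    rw [PySem.Int.mod_eq_emod_of_pos (by omega)]
    have := Int.emod_emod_of_dvd i (by norm_num : (3:Int) ∣ 15)
    omega
  rw [hmod3]

-- ===== VERDICT (by name: the statement is the Claim_ definition above) =====
theorem event_stream_spec : Claim_equal_event_stream := by
  intro n _
  unfold Spec_event_stream event_stream event_stream_alt
  rw [eventStreamGo_eq_map]
  exact List.map_congr_left fun j _ => line_eq_table j
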